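-- pv_equiv track=rewrite | github.com/f-martini/Qu3ST | qu3st/ntsp/generator/object_generators/security_positions.py | get_sec_owners_dict
-- ===== SOURCE A (Python) =====
-- def get_sec_owners_dict(
--         securities,
--         participants
-- ):
--     sec_owners_dict = {s: [] for s in range(len(securities))}
--     for p in participants["own"].keys():
--         for sec in participants["own"][p]["sps"].keys():
--             sec_owners_dict[sec].append(p)
--     return sec_owners_dict
-- ===== SOURCE B (Python) =====
-- def get_sec_owners_dict(
--         securities,
--         participants
-- ):
--     own = participants["own"]
--     return {s: [p for p in own if s in own[p]["sps"]]
--             for s in range(len(securities))}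
-- ===== Notes on version B (the rewrite author's own statement) =====
-- stated objective: alternative
-- what changed: B inverts the loop structure: instead of scattering appends into a pre-built index dict while looping participants then their sps keys, B iterates the security indices and gathers each security's owner list in one dict comprehension by a membership test on each participant's sps dict.
import Mathlib
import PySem

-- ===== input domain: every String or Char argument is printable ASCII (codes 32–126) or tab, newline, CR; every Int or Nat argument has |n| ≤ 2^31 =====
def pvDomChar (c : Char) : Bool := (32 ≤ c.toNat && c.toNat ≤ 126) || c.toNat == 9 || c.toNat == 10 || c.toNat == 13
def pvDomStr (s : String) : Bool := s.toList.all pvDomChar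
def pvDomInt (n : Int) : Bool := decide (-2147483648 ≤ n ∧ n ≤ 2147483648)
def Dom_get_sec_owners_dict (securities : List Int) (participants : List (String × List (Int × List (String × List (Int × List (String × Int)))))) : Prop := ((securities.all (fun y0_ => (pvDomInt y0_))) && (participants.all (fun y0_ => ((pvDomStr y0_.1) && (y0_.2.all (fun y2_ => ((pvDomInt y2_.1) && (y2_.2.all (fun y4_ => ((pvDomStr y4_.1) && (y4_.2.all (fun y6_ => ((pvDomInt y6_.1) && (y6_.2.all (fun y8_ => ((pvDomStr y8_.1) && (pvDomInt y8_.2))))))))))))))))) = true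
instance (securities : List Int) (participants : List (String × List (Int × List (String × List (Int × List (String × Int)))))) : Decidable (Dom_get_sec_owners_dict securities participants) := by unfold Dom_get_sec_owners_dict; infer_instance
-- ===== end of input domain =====

-- B inverts A's scatter loop into a per-security gather by membership tests; proved equal on Pre_ (alternative decomposition, no speed claim).

-- ===== PORT A =====
-- sec_owners_dict = {s: [] for s in range(len(securities))}; for p in own: for sec in own[p]["sps"]: sec_owners_dict[sec].append(p)
def get_sec_owners_dict (securities : List Int) (participants : List (String × List (Int × List (String × List (Int × List (String × Int)))))) : List (Int × List Int) :=
  ((((PySem.Dict.mk participants).get? "own").getD []).foldl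
    (fun d pp =>
      ((((PySem.Dict.mk pp.2).get? "sps").getD []).foldl
        (fun d sp => d.modify sp.1 [] (fun l => l ++ [pp.1])) d))
    ((PySem.List.pyRange 0 (securities.length : Int) 1).foldl
      (fun d s => d.insert s []) (PySem.Dict.empty : PySem.Dict Int (List Int)))).items

-- ===== PORT B =====
-- own = participants["own"]; {s: [p for p in own if s in own[p]["sps"]] for s in range(len(securities))}
def get_sec_owners_dict_alt (securities : List Int) (participants : List (String × List (Int × List (String × List (Int × List (String × Int)))))) : List (Int × List Int) :=
  (PySem.List.pyRange 0 (securities.length : Int) 1).map (fun s =>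
    (s, ((((PySem.Dict.mk participants).get? "own").getD []).filter (fun pp =>
          (PySem.Dict.mk (((PySem.Dict.mk pp.2).get? "sps").getD [])).contains s)).map (·.1)))

-- ===== PRECONDITION & SPEC =====
-- Pre_: "own" is present, every participant has an "sps" dict, and every sps key is in range(len(securities)) — exactly where Python A
-- returns without a KeyError; additionally each sps key list must be duplicate-free, since a duplicate-key association list does not
-- represent any Python dict (both programs only ever receive real dicts there).
def Pre_get_sec_owners_dict (securities : List Int) (participants : List (String × List (Int × List (String × List (Int × List (String × Int)))))) : Prop :=
  ((PySem.Dict.mk participants).get? "own").isSome = true ∧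
  ∀ pp ∈ ((PySem.Dict.mk participants).get? "own").getD [],
    ((PySem.Dict.mk pp.2).get? "sps").isSome = true ∧
    ((((PySem.Dict.mk pp.2).get? "sps").getD []).map (·.1)).Nodup ∧
    ∀ sp ∈ (((PySem.Dict.mk pp.2).get? "sps").getD []), 0 ≤ sp.1 ∧ sp.1 < (securities.length : Int)
instance (securities : List Int) (participants : List (String × List (Int × List (String × List (Int × List (String × Int)))))) : Decidable (Pre_get_sec_owners_dict securities participants) := by unfold Pre_get_sec_owners_dict; infer_instance

def pvWitness_get_sec_owners_dict : List Int × (List (String × List (Int × List (String × List (Int × List (String × Int)))))) :=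
  ([5], [("own", [(7, [("sps", [(0, [("x", 1)])])])])])

def Spec_get_sec_owners_dict (securities : List Int) (participants : List (String × List (Int × List (String × List (Int × List (String × Int)))))) (out : List (Int × List Int)) : Prop := out = get_sec_owners_dict_alt securities participants
instance (securities : List Int) (participants : List (String × List (Int × List (String × List (Int × List (String × Int)))))) (out : List (Int × List Int)) : Decidable (Spec_get_sec_owners_dict securities participants out) := by unfold Spec_get_sec_owners_dict; infer_instance

-- ===== CLAIM (what is proved, stated in full; the proofs are below) =====
def Claim_equal_get_sec_owners_dict : Prop := ∀ (securities : List Int) (participants : List (String × List (Int × List (String × List (Int × List (String × Int)))))), Dom_get_sec_owners_dict securities participants → Pre_get_sec_owners_dict securities participants → Spec_get_sec_owners_dict securities participants (get_sec_owners_dict securities participants)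
-- ===== LEMMAS AND PROOFS =====

-- one pass of inserting [] at fresh distinct keys appends the corresponding items
lemma pvItemsInsertNilFold (l : List Int) (d : PySem.Dict Int (List Int))
    (hnd : l.Nodup) (hfresh : ∀ x ∈ l, d.contains x = false) :
    (l.foldl (fun d s => d.insert s []) d).items = d.items ++ l.map (fun s => (s, ([] : List Int))) := by
  induction l generalizing d with
  | nil => simp
  | cons a t ih =>
    have ha : d.contains a = false := hfresh a (by simp)
    have hstep : (d.insert a []).items = d.items ++ [(a, ([] : List Int))] := by
      rw [PySem.Dict.items_insert, ha]; simp
    have htail : ∀ x ∈ t, (d.insert a []).contains x = false := by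
      intro x hx
      rw [PySem.Dict.contains_insert]
      have hxa : x ≠ a := by
        intro h; subst h; exact (List.nodup_cons.mp hnd).1 hx
      simp [hxa, hfresh x (by simp [hx])]
    rw [List.foldl_cons, ih _ (List.nodup_cons.mp hnd).2 htail, hstep]
    simp

-- getD stays [] through the insert-[] loop
lemma pvGetDInsertNilFold (l : List Int) (d : PySem.Dict Int (List Int)) (c : Int)
    (h : d.getD c [] = []) :
    (l.foldl (fun d s => d.insert s []) d).getD c [] = [] := by
  induction l generalizing d with
  | nil => simpa using h
  | cons a t ih =>
    rw [List.foldl_cons]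
    apply ih
    rw [PySem.Dict.getD_insert]
    split <;> simp [h]

-- a modify-append loop whose keys all exist leaves the key list unchanged
lemma pvKeysModifyFold (l : List (Int × Int)) (d : PySem.Dict Int (List Int))
    (h : ∀ q ∈ l, d.contains q.1 = true) :
    (l.foldl (fun d q => d.modify q.1 [] (fun t => t ++ [q.2])) d).keys = d.keys := by
  induction l generalizing d with
  | nil => rfl
  | cons a t ih =>
    have ha : d.contains a.1 = true := h a (by simp)
    have hk : (d.modify a.1 [] (fun t => t ++ [a.2])).keys = d.keys := by
      rw [PySem.Dict.keys_modify, PySem.Dict.keys_insert_of_contains]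
      exact ha
    have ht : ∀ q ∈ t, (d.modify a.1 [] (fun t => t ++ [a.2])).contains q.1 = true := by
      intro q hq
      rw [PySem.Dict.contains_modify]
      simp [h q (by simp [hq])]
    rw [List.foldl_cons, ih _ ht, hk]

-- the nested participant/sps scatter loop is the flat modify-append loop
lemma pvFlattenLoop (own : List (Int × List (String × List (Int × List (String × Int)))))
    (d : PySem.Dict Int (List Int)) :
    own.foldl (fun d pp =>
      ((((PySem.Dict.mk pp.2).get? "sps").getD []).foldl
        (fun d sp => d.modify sp.1 [] (fun l => l ++ [pp.1])) d)) d
    = (own.flatMap (fun pp =>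
        (((PySem.Dict.mk pp.2).get? "sps").getD []).map (fun sp => (sp.1, pp.1)))).foldl
        (fun d q => d.modify q.1 [] (fun l => l ++ [q.2])) d := by
  induction own generalizing d with
  | nil => rfl
  | cons pp t ih =>
    rw [List.foldl_cons, List.flatMap_cons, List.foldl_append, ih, List.foldl_map]

-- one participant's flattened contribution at security c, keys duplicate-free
lemma pvOneParticipant (sps : List (Int × List (String × Int))) (p c : Int)
    (h : (sps.map (·.1)).Nodup) :
    ((sps.map (fun sp => (sp.1, p))).filter (fun q => q.1 == c)).map (·.2)
    = if (PySem.Dict.mk sps).contains c then [p] else [] := by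
  induction sps with
  | nil => simp [PySem.Dict.contains]
  | cons a t ih =>
    by_cases hac : a.1 = c
    · subst hac
      have hnotin : a.1 ∉ t.map (·.1) := (List.nodup_cons.mp (by simpa using h)).1
      have hnil : (t.map (fun sp => (sp.1, p))).filter (fun q => q.1 == a.1) = [] := by
        rw [List.filter_eq_nil_iff]
        intro q hq
        obtain ⟨sp, hsp, rfl⟩ := List.mem_map.mp hq
        simp only [beq_iff_eq]
        intro hcon
        exact hnotin (List.mem_map.mpr ⟨sp, hsp, hcon⟩)
      simp [PySem.Dict.contains, hnil]
    · have := ih (by simpa using (List.nodup_cons.mp (by simpa using h)).2)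
      have hb : (a.1 == c) = false := by simpa using hac
      simp only [List.map_cons, List.filter_cons]
      simp only [PySem.Dict.contains] at this ⊢
      simp only [List.any_cons, hb, Bool.false_or]
      simpa using this

-- the flat filter at c equals B's membership-filtered participant list
lemma pvGather (own : List (Int × List (String × List (Int × List (String × Int))))) (c : Int)
    (h : ∀ pp ∈ own, ((((PySem.Dict.mk pp.2).get? "sps").getD []).map (·.1)).Nodup) :
    ((own.flatMap (fun pp =>
        (((PySem.Dict.mk pp.2).get? "sps").getD []).map (fun sp => (sp.1, pp.1)))).filter
        (fun q => q.1 == c)).map (·.2)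
    = (own.filter (fun pp =>
        (PySem.Dict.mk (((PySem.Dict.mk pp.2).get? "sps").getD [])).contains c)).map (·.1) := by
  induction own with
  | nil => rfl
  | cons pp t ih =>
    rw [List.flatMap_cons, List.filter_append, List.map_append,
        pvOneParticipant _ pp.1 c (h pp (by simp)), ih (fun q hq => h q (by simp [hq])),
        List.filter_cons]
    split <;> simp_all

-- ===== VERDICT (by name: the statement is the Claim_ definition above) =====
theorem get_sec_owners_dict_spec : Claim_equal_get_sec_owners_dict := by
  intro securities participants _ hpre
  obtain ⟨-, hall⟩ := hpre
  unfold Spec_get_sec_owners_dict get_sec_owners_dict get_sec_owners_dict_alt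
  rw [pvFlattenLoop]
  have hitems : ((PySem.List.pyRange 0 (securities.length : Int) 1).foldl
      (fun d s => d.insert s []) (PySem.Dict.empty : PySem.Dict Int (List Int))).items
      = (PySem.List.pyRange 0 (securities.length : Int) 1).map (fun s => (s, ([] : List Int))) := by
    rw [pvItemsInsertNilFold _ _ (PySem.List.nodup_pyRange_one _ _) (by intro x _; simp)]
    simp [PySem.Dict.empty]
  have hkeys0 : ((PySem.List.pyRange 0 (securities.length : Int) 1).foldl
      (fun d s => d.insert s []) (PySem.Dict.empty : PySem.Dict Int (List Int))).keys
      = PySem.List.pyRange 0 (securities.length : Int) 1 := by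
    simp only [PySem.Dict.keys, hitems, List.map_map]
    exact (List.map_congr_left (fun a _ => rfl)).trans (List.map_id _)
  have hflatmem : ∀ q ∈ (((PySem.Dict.mk participants).get? "own").getD []).flatMap (fun pp =>
        (((PySem.Dict.mk pp.2).get? "sps").getD []).map (fun sp => (sp.1, pp.1))),
      ((PySem.List.pyRange 0 (securities.length : Int) 1).foldl
        (fun d s => d.insert s []) (PySem.Dict.empty : PySem.Dict Int (List Int))).contains q.1 = true := by
    intro q hq
    obtain ⟨pp, hpp, hsp⟩ := List.mem_flatMap.mp hq
    obtain ⟨sp, hsp', rfl⟩ := List.mem_map.mp hsp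
    have hb := (hall pp hpp).2.2 sp hsp'
    rw [PySem.Dict.contains_iff_mem_keys, hkeys0, PySem.List.mem_pyRange_one]
    exact ⟨hb.1, hb.2⟩
  have hkeys : (List.foldl (fun d q => d.modify q.1 [] (fun l => l ++ [q.2]))
        ((PySem.List.pyRange 0 (securities.length : Int) 1).foldl
          (fun d s => d.insert s []) (PySem.Dict.empty : PySem.Dict Int (List Int)))
        ((((PySem.Dict.mk participants).get? "own").getD []).flatMap (fun pp =>
          (((PySem.Dict.mk pp.2).get? "sps").getD []).map (fun sp => (sp.1, pp.1))))).keys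
      = PySem.List.pyRange 0 (securities.length : Int) 1 := by
    rw [pvKeysModifyFold _ _ hflatmem, hkeys0]
  rw [PySem.Dict.items_eq_map_keys _ (by rw [hkeys]; exact PySem.List.nodup_pyRange_one _ _) ([] : List Int),
      hkeys]
  apply List.map_congr_left
  intro c _
  rw [PySem.Dict.getD_foldl_modify_append,
      pvGetDInsertNilFold _ _ _ (by simp), List.nil_append,
      pvGather _ c (fun pp hpp => (hall pp hpp).2.1)]
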